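-- pv_equiv track=rewrite | github.com/kamsahn/sam-learns | daily-coding-problem/260.py | reconstruct_order
-- ===== SOURCE A (Python) =====
-- def reconstruct_order(clue: list) -> list[int]:
--     minus_indices = []
--     for i in range(len(clue)):
--         if clue[i] == "-":
--             minus_indices.insert(0, i)
--
--     ans = list(range(len(clue)))
--
--     for i in minus_indices:
--         temp = ans.pop(0)
--         ans = ans[:i] + [temp] + ans[i:]
--
--     return ans
-- ===== SOURCE B (Python) =====
-- def reconstruct_order(clue: list) -> list[int]:
--     k = sum(1 for c in clue if c == "-")
--     ans = []
--     minus_seen = 0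
--     nxt = k
--     for c in clue:
--         if c == "-":
--             minus_seen += 1
--             ans.append(k - minus_seen)
--         else:
--             ans.append(nxt)
--             nxt += 1
--     return ans
-- ===== Notes on version B (the rewrite author's own statement) =====
-- stated objective: alternative
-- what changed: Replaces A's pop-front/re-insert list simulation (one pop+two slices per '-') by a single left-to-right pass that assigns each '-' position the next descending value below the total '-' count and each other position the next ascending value from that count.
import Mathlib
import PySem

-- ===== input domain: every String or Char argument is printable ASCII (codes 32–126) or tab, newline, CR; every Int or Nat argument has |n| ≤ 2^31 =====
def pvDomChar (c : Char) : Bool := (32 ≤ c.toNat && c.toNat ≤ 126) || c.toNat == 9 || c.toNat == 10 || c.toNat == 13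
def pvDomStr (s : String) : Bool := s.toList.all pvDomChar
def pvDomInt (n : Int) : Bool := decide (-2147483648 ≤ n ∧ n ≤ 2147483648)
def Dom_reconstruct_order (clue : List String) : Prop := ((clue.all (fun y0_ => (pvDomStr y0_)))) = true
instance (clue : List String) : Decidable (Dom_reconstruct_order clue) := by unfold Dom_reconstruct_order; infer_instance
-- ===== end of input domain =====

-- B replaces A's pop-front/re-insert list simulation by a single left-to-right pass that
-- assigns '-' positions descending values below the '-' count and other positions ascending
-- values from that count; this file proves the two return the same list on every input.


-- ===== PORT A =====
-- one iteration of A's second loop: temp = ans.pop(0); ans = ans[:i] + [temp] + ans[i:]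
-- (the 'none' branch is Python's IndexError from pop on an empty list; it is unreachable:
-- the loop runs only when clue has a '-', hence ans is nonempty throughout)
def pvStepA (ans : List Int) (i : Int) : List Int :=
  match PySem.List.pop? ans 0 with
  | none => ans
  | some (temp, rest) =>
      PySem.List.slice rest none (some i) ++ [temp] ++ PySem.List.slice rest (some i) none

def reconstruct_order (clue : List String) : List Int :=
  let minus_indices : List Int :=
    (PySem.List.pyRange 0 clue.length 1).foldl
      (fun mi i => if PySem.List.pyGet? clue i = some "-" then PySem.List.insert mi 0 i else mi) []
  let ans : List Int := PySem.List.pyRange 0 clue.length 1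
  minus_indices.foldl pvStepA ans

-- ===== PORT B =====
def reconstruct_order_alt (clue : List String) : List Int :=
  let k : Int := clue.foldl (fun acc c => if c = "-" then acc + 1 else acc) 0
  (clue.foldl
    (fun (st : Int × Int × List Int) c =>
      if c = "-" then (st.1 + 1, st.2.1, st.2.2 ++ [k - (st.1 + 1)])
      else (st.1, st.2.1 + 1, st.2.2 ++ [st.2.1]))
    (0, k, ([] : List Int))).2.2

-- ===== PRECONDITION & SPEC =====
def Spec_reconstruct_order (clue : List String) (out : List Int) : Prop := out = reconstruct_order_alt clue
instance (clue : List String) (out : List Int) : Decidable (Spec_reconstruct_order clue out) := by unfold Spec_reconstruct_order; infer_instance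

-- ===== CLAIM (what is proved, stated in full; the proofs are below) =====
def Claim_equal_reconstruct_order : Prop := ∀ (clue : List String), Dom_reconstruct_order clue → Spec_reconstruct_order clue (reconstruct_order clue)

-- ===== LEMMAS AND PROOFS =====

-- A's descending minus-index list, in closed form
def pvMinus (clue : List String) : List Int :=
  ((PySem.List.pyRange 0 clue.length 1).filter
    (fun i => decide (PySem.List.pyGet? clue i = some "-"))).reverse

lemma reconstruct_order_eq_fold (clue : List String) :
    reconstruct_order clue =
      (pvMinus clue).foldl pvStepA (PySem.List.pyRange 0 clue.length 1) := by
  unfold reconstruct_order pvMinus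
  simp only [PySem.List.insert_zero, PySem.List.foldl_ite_eq_foldl_filter,
    List.foldl_flip_cons_eq_append', List.append_nil]

lemma pvMinus_mem_bounds (clue : List String) :
    ∀ d ∈ pvMinus clue, 0 ≤ d ∧ d < (clue.length : Int) := by
  intro d hd
  simp [pvMinus, List.mem_filter, PySem.List.mem_pyRange_one] at hd
  exact ⟨hd.1.1, hd.1.2⟩

lemma pvMinus_append (clue : List String) (c : String) :
    pvMinus (clue ++ [c]) =
      if c = "-" then (clue.length : Int) :: pvMinus clue else pvMinus clue := by
  have hcast : (((clue ++ [c]).length : Nat) : Int) = (clue.length : Int) + 1 := by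
    simp
  have hsplit : PySem.List.pyRange 0 ((clue ++ [c]).length : Int) 1
      = PySem.List.pyRange 0 (clue.length : Int) 1 ++ [(clue.length : Int)] := by
    rw [hcast, PySem.List.pyRange_one_succ_right (by positivity)]
  have hget : ∀ i ∈ PySem.List.pyRange 0 (clue.length : Int) 1,
      PySem.List.pyGet? (clue ++ [c]) i = PySem.List.pyGet? clue i := by
    intro i hi
    rw [PySem.List.mem_pyRange_one] at hi
    rw [PySem.List.pyGet?_of_nonneg (clue ++ [c]) hi.1, PySem.List.pyGet?_of_nonneg clue hi.1]
    have : i.toNat < clue.length := by omega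
    rw [List.getElem?_append_left this]
  have hlast : PySem.List.pyGet? (clue ++ [c]) (clue.length : Int) = some c :=
    PySem.List.pyGet?_append_length clue [] c
  unfold pvMinus
  rw [hsplit, List.filter_append, List.filter_congr (fun i hi => by rw [hget i hi])]
  by_cases hc : c = "-"
  · simp [hc]
  · simp [hc]

lemma pvStepA_length (L : List Int) (i : Int) (hi : 0 ≤ i) :
    (pvStepA L i).length = L.length := by
  cases L with
  | nil => rfl
  | cons x t =>
      simp [pvStepA, PySem.List.pop?_zero_cons, PySem.List.slice_to (xs := t) hi,
        PySem.List.slice_from (xs := t) hi]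

lemma pvStepA_append (L : List Int) (x : Int) (i : Int) (hi : 0 ≤ i)
    (hlt : i < (L.length : Int)) :
    pvStepA (L ++ [x]) i = pvStepA L i ++ [x] := by
  cases L with
  | nil => simp at hlt; omega
  | cons y t =>
      have hle : i.toNat ≤ t.length := by simp at hlt; omega
      simp [pvStepA, PySem.List.pop?_zero_cons, PySem.List.slice_to (xs := t) hi,
        PySem.List.slice_from (xs := t) hi, PySem.List.slice_to (xs := t ++ [x]) hi,
        PySem.List.slice_from (xs := t ++ [x]) hi,
        List.take_append_of_le_length hle, List.drop_append_of_le_length hle]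

lemma pvStepA_map (L : List Int) (f : Int → Int) (i : Int) (hi : 0 ≤ i) :
    pvStepA (L.map f) i = (pvStepA L i).map f := by
  cases L with
  | nil => rfl
  | cons y t =>
      simp [pvStepA, PySem.List.pop?_zero_cons, PySem.List.slice_to (xs := t) hi,
        PySem.List.slice_from (xs := t) hi, PySem.List.slice_to (xs := t.map f) hi,
        PySem.List.slice_from (xs := t.map f) hi, List.map_take, List.map_drop]

lemma foldA_append (ds : List Int) (L : List Int) (x : Int)
    (h : ∀ d ∈ ds, 0 ≤ d ∧ d < (L.length : Int)) :
    ds.foldl pvStepA (L ++ [x]) = ds.foldl pvStepA L ++ [x] := by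
  induction ds generalizing L with
  | nil => rfl
  | cons d ds ih =>
      have hd := h d List.mem_cons_self
      rw [List.foldl_cons, List.foldl_cons, pvStepA_append L x d hd.1 hd.2]
      exact ih _ (fun e he => by
        have := h e (List.mem_cons_of_mem _ he)
        rwa [pvStepA_length L d hd.1])

lemma foldA_map (ds : List Int) (L : List Int) (f : Int → Int) (h : ∀ d ∈ ds, 0 ≤ d) :
    ds.foldl pvStepA (L.map f) = (ds.foldl pvStepA L).map f := by
  induction ds generalizing L with
  | nil => rfl
  | cons d ds ih =>
      rw [List.foldl_cons, List.foldl_cons, pvStepA_map L f d (h d List.mem_cons_self)]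
      exact ih _ (fun e he => h e (List.mem_cons_of_mem _ he))

lemma A_append (clue : List String) (c : String) :
    reconstruct_order (clue ++ [c]) =
      if c = "-" then (reconstruct_order clue).map (fun v => v + 1) ++ [0]
      else reconstruct_order clue ++ [(clue.length : Int)] := by
  have hcast : (((clue ++ [c]).length : Nat) : Int) = (clue.length : Int) + 1 := by simp
  have hsplit : PySem.List.pyRange 0 ((clue ++ [c]).length : Int) 1
      = PySem.List.pyRange 0 (clue.length : Int) 1 ++ [(clue.length : Int)] := by
    rw [hcast, PySem.List.pyRange_one_succ_right (by positivity)]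
  have hlen : ((PySem.List.pyRange 0 (clue.length : Int) 1).length : Int) = (clue.length : Int) := by
    rw [PySem.List.length_pyRange_one]; omega
  have hbounds : ∀ d ∈ pvMinus clue, 0 ≤ d ∧ d < ((PySem.List.pyRange 0 (clue.length : Int) 1).length : Int) := by
    intro d hd; rw [hlen]; exact pvMinus_mem_bounds clue d hd
  rw [reconstruct_order_eq_fold, reconstruct_order_eq_fold, pvMinus_append]
  by_cases hc : c = "-"
  · subst hc
    rw [if_pos rfl, if_pos rfl, List.foldl_cons]
    have hrest : PySem.List.pyRange 1 ((clue.length : Int) + 1) 1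
        = (PySem.List.pyRange 0 (clue.length : Int) 1).map (fun v => v + 1) := by
      rw [PySem.List.pyRange_one, PySem.List.pyRange_one, List.map_map]
      have h1 : (((clue.length : Int) + 1 - 1)).toNat = (((clue.length : Int) - 0)).toNat := by omega
      rw [h1]
      exact List.map_congr_left (fun k hk => by simp [Function.comp]; omega)
    have hstep : pvStepA (PySem.List.pyRange 0 ((clue ++ ["-"]).length : Int) 1) (clue.length : Int)
        = (PySem.List.pyRange 0 (clue.length : Int) 1).map (fun v => v + 1) ++ [0] := by
      have hcons : PySem.List.pyRange 0 ((clue ++ ["-"]).length : Int) 1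
          = 0 :: PySem.List.pyRange 1 ((clue.length : Int) + 1) 1 := by
        rw [hcast, PySem.List.pyRange_one_cons (by positivity)]; norm_num
      have hrlen : (PySem.List.pyRange 1 ((clue.length : Int) + 1) 1).length = clue.length := by
        rw [PySem.List.length_pyRange_one]; omega
      rw [hcons]
      show (match PySem.List.pop? (0 :: PySem.List.pyRange 1 ((clue.length : Int) + 1) 1) 0 with
        | none => 0 :: PySem.List.pyRange 1 ((clue.length : Int) + 1) 1
        | some (temp, rest) =>
          PySem.List.slice rest none (some (clue.length : Int)) ++ [temp] ++
            PySem.List.slice rest (some (clue.length : Int)) none)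
        = (PySem.List.pyRange 0 (clue.length : Int) 1).map (fun v => v + 1) ++ [0]
      rw [PySem.List.pop?_zero_cons]
      dsimp only
      rw [PySem.List.slice_to _ (Int.natCast_nonneg _), PySem.List.slice_from _ (Int.natCast_nonneg _)]
      rw [List.take_of_length_le (by rw [hrlen]; omega), List.drop_of_length_le (by rw [hrlen]; omega)]
      rw [hrest]; simp
    rw [hstep, foldA_append _ _ _ (by simpa using hbounds),
      foldA_map _ _ _ (fun d hd => (pvMinus_mem_bounds clue d hd).1)]
  · rw [if_neg hc, if_neg hc, hsplit, foldA_append _ _ _ hbounds]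

-- B's loop as a structural recursion
def pvGoB (k : Int) : List String → Int → Int → List Int
  | [], _, _ => []
  | c :: cs, seen, nxt =>
      if c = "-" then (k - (seen + 1)) :: pvGoB k cs (seen + 1) nxt
      else nxt :: pvGoB k cs seen (nxt + 1)

lemma foldB_eq_goB (k : Int) (clue : List String) (seen nxt : Int) (acc : List Int) :
    (clue.foldl
      (fun (st : Int × Int × List Int) c =>
        if c = "-" then (st.1 + 1, st.2.1, st.2.2 ++ [k - (st.1 + 1)])
        else (st.1, st.2.1 + 1, st.2.2 ++ [st.2.1]))
      (seen, nxt, acc)).2.2 = acc ++ pvGoB k clue seen nxt := by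
  induction clue generalizing seen nxt acc with
  | nil => simp [pvGoB]
  | cons c cs ih =>
      by_cases hc : c = "-"
      · simp [pvGoB, hc, List.foldl_cons, ih]
      · simp [pvGoB, hc, List.foldl_cons, ih]

lemma kFold_eq (clue : List String) :
    clue.foldl (fun acc c => if c = "-" then acc + 1 else acc) 0
      = ((clue.countP (fun c => c = "-") : Nat) : Int) := by
  rw [PySem.List.foldl_ite_add_one]
  simp

lemma pvGoB_append (k : Int) (xs ys : List String) (seen nxt : Int) :
    pvGoB k (xs ++ ys) seen nxt =
      pvGoB k xs seen nxt ++
        pvGoB k ys (seen + (xs.countP (fun c => c = "-") : Int))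
          (nxt + ((xs.length : Int) - (xs.countP (fun c => c = "-") : Int))) := by
  induction xs generalizing seen nxt with
  | nil => simp [pvGoB]
  | cons c cs ih =>
      by_cases hc : c = "-"
      · simp only [List.cons_append, pvGoB, ih, List.countP_cons, hc]
        norm_num
        rw [show seen + 1 + ((List.countP (fun c => decide (c = "-")) cs : Nat) : Int)
            = seen + (((List.countP (fun c => decide (c = "-")) cs : Nat) : Int) + 1) from by ring]
      · simp only [List.cons_append, pvGoB, if_neg hc, ih, List.countP_cons]
        have hd : (decide (c = "-")) = false := by simp [hc]
        rw [hd]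
        norm_num
        rw [show nxt + 1 + (((cs.length : Nat) : Int) - ((List.countP (fun c => decide (c = "-")) cs : Nat) : Int))
            = nxt + (((cs.length : Nat) : Int) + 1 - ((List.countP (fun c => decide (c = "-")) cs : Nat) : Int)) from by ring]

lemma pvGoB_shift (k : Int) (clue : List String) (seen nxt : Int) :
    pvGoB (k + 1) clue seen (nxt + 1) = (pvGoB k clue seen nxt).map (fun v => v + 1) := by
  induction clue generalizing seen nxt with
  | nil => simp [pvGoB]
  | cons c cs ih =>
      by_cases hc : c = "-"
      · simp only [pvGoB, if_pos hc, List.map_cons, ih]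
        congr 1; ring
      · simp only [pvGoB, if_neg hc, List.map_cons, ih]

lemma B_eq_goB (clue : List String) :
    reconstruct_order_alt clue =
      pvGoB ((clue.countP (fun c => c = "-") : Int)) clue 0 ((clue.countP (fun c => c = "-") : Int)) := by
  unfold reconstruct_order_alt
  rw [kFold_eq, foldB_eq_goB]
  simp

lemma B_append (clue : List String) (c : String) :
    reconstruct_order_alt (clue ++ [c]) =
      if c = "-" then (reconstruct_order_alt clue).map (fun v => v + 1) ++ [0]
      else reconstruct_order_alt clue ++ [(clue.length : Int)] := by
  rw [B_eq_goB, B_eq_goB, pvGoB_append]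
  by_cases hc : c = "-"
  · subst hc
    rw [if_pos rfl]
    have hcount : (((clue ++ ["-"]).countP (fun c => c = "-") : Nat) : Int)
        = ((clue.countP (fun c => c = "-") : Nat) : Int) + 1 := by
      simp [List.countP_append]
    rw [hcount]
    congr 1
    · rw [← pvGoB_shift]
    · simp [pvGoB]
  · rw [if_neg hc]
    have hcount : (((clue ++ [c]).countP (fun c => c = "-") : Nat) : Int)
        = ((clue.countP (fun c => c = "-") : Nat) : Int) := by
      simp [List.countP_append, hc]
    rw [hcount]
    have harg : ((clue.countP (fun c => c = "-") : Nat) : Int)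
        + (((clue.length : Nat) : Int) - ((clue.countP (fun c => c = "-") : Nat) : Int))
        = ((clue.length : Nat) : Int) := by ring
    simp [pvGoB, hc, harg]

lemma main_eq (clue : List String) : reconstruct_order clue = reconstruct_order_alt clue := by
  induction clue using List.reverseRecOn with
  | nil => decide
  | append_singleton xs c ih => rw [A_append, B_append, ih]

-- ===== VERDICT (by name: the statement is the Claim_ definition above) =====
theorem reconstruct_order_spec : Claim_equal_reconstruct_order := by
  intro clue _
  unfold Spec_reconstruct_order
  exact main_eq clue
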